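-- pv_equiv track=rewrite | github.com/Design-Arena/conversation-bench | benchmarks/grocery_bench/turns.py | get_relevant_dimensions
-- ===== SOURCE A (Python) =====
-- CORE_DIMENSIONS = ['kb_grounding', 'instruction_following', 'tool_use_correct']
--
-- CATEGORY_DIMENSIONS = {
--     'long_range_memory':    ['state_tracking'],
--     'error_recovery':       ['state_tracking'],
--
--     'ambiguous_entity':     ['ambiguity_handling'],
--     'numerical_reasoning':  ['ambiguity_handling'],
--
--     'basic_qa':             [],
--     'tool_use':             [],
-- }
--
-- def get_relevant_dimensions(turn: dict) -> list[str]: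
--     """Return scoring dimensions for a turn.
--
--     Always includes kb_grounding, instruction_following, tool_use_correct.
--     Adds state_tracking and/or ambiguity_handling based on the turn's categories.
--     """
--     dims = list(CORE_DIMENSIONS)
--
--     categories = turn.get('categories', [])
--     if not categories:
--         cat = turn.get('category')
--         categories = [cat] if cat else []
--
--     extra = set()
--     for cat in categories:
--         extra.update(CATEGORY_DIMENSIONS.get(cat, []))
--     dims.extend(sorted(extra))
--
--     return dims
-- ===== SOURCE B (Python) =====
-- CORE_DIMENSIONS = ['kb_grounding', 'instruction_following', 'tool_use_correct']
--
-- CATEGORY_DIMENSIONS = {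
--     'long_range_memory':    ['state_tracking'],
--     'error_recovery':       ['state_tracking'],
--
--     'ambiguous_entity':     ['ambiguity_handling'],
--     'numerical_reasoning':  ['ambiguity_handling'],
--
--     'basic_qa':             [],
--     'tool_use':             [],
-- }
--
-- def get_relevant_dimensions(turn: dict) -> list[str]:
--     """Return scoring dimensions for a turn.
--
--     Core dimensions always; then each extra dimension, in alphabetical order,
--     iff some category of the turn maps to it.
--     """
--     categories = turn.get('categories', [])
--     if not categories:
--         cat = turn.get('category')
--         categories = [cat] if cat else []
--
--     dims = list(CORE_DIMENSIONS)
--     for extra in ('ambiguity_handling', 'state_tracking'):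
--         if any(extra in CATEGORY_DIMENSIONS.get(c, ()) for c in categories):
--             dims.append(extra)
--     return dims
-- ===== Notes on version B (the rewrite author's own statement) =====
-- stated objective: simpler
-- what changed: Instead of accumulating a set of extra dimensions via dict-value unions and sorting it, B iterates over the two possible extra dimensions in alphabetical order and appends each iff some category maps to it, so no set and no sort are maintained.
import Mathlib
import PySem

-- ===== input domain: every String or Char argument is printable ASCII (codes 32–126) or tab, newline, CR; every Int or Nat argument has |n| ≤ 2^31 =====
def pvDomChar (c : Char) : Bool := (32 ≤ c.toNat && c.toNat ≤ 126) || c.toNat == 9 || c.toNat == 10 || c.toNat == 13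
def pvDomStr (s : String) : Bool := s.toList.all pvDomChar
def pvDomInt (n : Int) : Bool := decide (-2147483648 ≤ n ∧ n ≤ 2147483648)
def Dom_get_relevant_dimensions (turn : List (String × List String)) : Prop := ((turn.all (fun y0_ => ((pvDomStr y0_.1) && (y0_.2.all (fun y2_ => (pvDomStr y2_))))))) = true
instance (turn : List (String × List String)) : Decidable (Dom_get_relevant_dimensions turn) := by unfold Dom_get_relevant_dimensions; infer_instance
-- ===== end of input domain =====

-- B keeps boolean membership checks per extra dimension and appends the extras in
-- alphabetical order directly, instead of A's set-union-then-sort (objective: simpler).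

-- ===== PORT A =====
def CORE_DIMENSIONS : List String := ["kb_grounding", "instruction_following", "tool_use_correct"]

def CATEGORY_DIMENSIONS : PySem.Dict String (List String) :=
  PySem.Dict.ofList
    [("long_range_memory",   ["state_tracking"]),
     ("error_recovery",      ["state_tracking"]),
     ("ambiguous_entity",    ["ambiguity_handling"]),
     ("numerical_reasoning", ["ambiguity_handling"]),
     ("basic_qa",            []),
     ("tool_use",            [])]

def get_relevant_dimensions (turn : List (String × List String)) : List String :=
  let dims := CORE_DIMENSIONS
  let categories := (PySem.Dict.mk turn).getD "categories" []
  -- Python's fallback 'categories = [cat] if cat else []' with a truthy cat (a nonempty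
  -- list) makes A raise TypeError (unhashable key) — those inputs are outside Pre_;
  -- on Pre_ the fallback is always [], i.e. categories stays as it is.
  let extra := categories.foldl
    (fun s cat => PySem.Set.update s (CATEGORY_DIMENSIONS.getD cat [])) PySem.Set.empty
  dims ++ PySem.List.sorted extra (fun x => x) false

-- ===== PORT B =====
def get_relevant_dimensions_alt (turn : List (String × List String)) : List String :=
  let categories := (PySem.Dict.mk turn).getD "categories" []
  -- same fallback note as in port A: outside Pre_ Python B raises too; here it is [].
  let dims := CORE_DIMENSIONS
  ["ambiguity_handling", "state_tracking"].foldl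
    (fun ds extra =>
      if categories.any (fun c => (CATEGORY_DIMENSIONS.getD c []).contains extra)
      then ds ++ [extra] else ds)
    dims

-- ===== PRECONDITION & SPEC =====
-- Pre_ excludes inputs on which Python A raises TypeError (unhashable key): those where
-- 'categories' is absent/empty and 'category' maps to a nonempty list.
def Pre_get_relevant_dimensions (turn : List (String × List String)) : Prop :=
  (PySem.Dict.mk turn).getD "categories" [] = [] →
    ((PySem.Dict.mk turn).get? "category").getD [] = []
instance (turn : List (String × List String)) : Decidable (Pre_get_relevant_dimensions turn) := by unfold Pre_get_relevant_dimensions; infer_instance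

def pvWitness_get_relevant_dimensions : (List (String × List String)) :=
  [("categories", ["error_recovery", "ambiguous_entity"])]

def Spec_get_relevant_dimensions (turn : List (String × List String)) (out : List String) : Prop := out = get_relevant_dimensions_alt turn
instance (turn : List (String × List String)) (out : List String) : Decidable (Spec_get_relevant_dimensions turn out) := by unfold Spec_get_relevant_dimensions; infer_instance

-- ===== CLAIM (what is proved, stated in full; the proofs are below) =====
def Claim_equal_get_relevant_dimensions : Prop := ∀ (turn : List (String × List String)), Dom_get_relevant_dimensions turn → Pre_get_relevant_dimensions turn → Spec_get_relevant_dimensions turn (get_relevant_dimensions turn)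


-- ===== LEMMAS AND PROOFS =====

lemma empty_contains (x : String) : PySem.Set.contains PySem.Set.empty x = false := rfl

-- Bool form of "s is one of the five states A's 'extra' set can be in"
def goodSet (s : PySem.Set String) : Bool :=
  s == [] || s == ["state_tracking"] || s == ["ambiguity_handling"] ||
  s == ["state_tracking", "ambiguity_handling"] || s == ["ambiguity_handling", "state_tracking"]

lemma cd_items : CATEGORY_DIMENSIONS.items =
    [("long_range_memory",   ["state_tracking"]),
     ("error_recovery",      ["state_tracking"]),
     ("ambiguous_entity",    ["ambiguity_handling"]),
     ("numerical_reasoning", ["ambiguity_handling"]),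
     ("basic_qa",            []),
     ("tool_use",            [])] := by decide

-- each category maps to one of three concrete dimension lists
lemma gvals (c : String) :
    CATEGORY_DIMENSIONS.getD c [] = [] ∨
    CATEGORY_DIMENSIONS.getD c [] = ["state_tracking"] ∨
    CATEGORY_DIMENSIONS.getD c [] = ["ambiguity_handling"] := by
  rcases h : CATEGORY_DIMENSIONS.get? c with _ | v
  · left; simp [PySem.Dict.getD_eq_get?_getD, h]
  · have hv : (c, v) ∈ CATEGORY_DIMENSIONS.items := PySem.Dict.mem_items_of_get?_eq_some _ h
    rw [cd_items] at hv
    rw [PySem.Dict.getD_eq_get?_getD, h]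
    simp at hv ⊢
    tauto

lemma fold_char (cats : List String) :
    ∀ (s : PySem.Set String), goodSet s = true →
    PySem.List.sorted
      (cats.foldl (fun s cat => PySem.Set.update s (CATEGORY_DIMENSIONS.getD cat [])) s)
      (fun x => x) false =
    (if s.contains "ambiguity_handling" ||
        cats.any (fun c => (CATEGORY_DIMENSIONS.getD c []).contains "ambiguity_handling")
     then ["ambiguity_handling"] else []) ++
    (if s.contains "state_tracking" ||
        cats.any (fun c => (CATEGORY_DIMENSIONS.getD c []).contains "state_tracking")
     then ["state_tracking"] else []) := by
  induction cats with
  | nil =>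
    intro s hs
    simp only [goodSet, Bool.or_eq_true, beq_iff_eq] at hs
    rcases hs with (((h | h) | h) | h) | h <;> subst h <;>
      simp [PySem.List.sorted, PySem.List.insertBy, PySem.Set.contains] <;> decide
  | cons c rest ih =>
    intro s hs
    simp only [goodSet, Bool.or_eq_true, beq_iff_eq] at hs
    rcases gvals c with hg | hg | hg <;>
      rcases hs with (((h | h) | h) | h) | h <;> subst h <;>
      simp only [List.foldl_cons, List.any_cons, hg] <;>
      rw [ih _ (by decide)] <;>
      simp [PySem.Set.update, PySem.Set.add, PySem.Set.contains]

-- ===== VERDICT (by name: the statement is the Claim_ definition above) =====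
theorem get_relevant_dimensions_spec : Claim_equal_get_relevant_dimensions := by
  intro turn _ _
  show _ = _
  simp only [get_relevant_dimensions, get_relevant_dimensions_alt]
  rw [fold_char _ PySem.Set.empty rfl]
  simp only [List.foldl_cons, List.foldl_nil, empty_contains, Bool.false_or]
  split_ifs <;> simp
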